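-- pv_equiv track=rewrite | github.com/kdhageman/cryptopals | challenges/challenge_8.py | is_aes_encrypted
-- ===== SOURCE A (Python) =====
-- def break_in_blocks(plaintext, ksize):
--     """
--     Break the plain text in blocks of size ksize
--     :param plaintext:
--     :param ksize:
--     :return:
--     """
--     cur_index = 0
--     res = []
--     while cur_index + ksize < len(plaintext):
--         res.append(plaintext[cur_index:cur_index+ksize])
--         cur_index += ksize
--     return res
--
-- def is_aes_encrypted(ct):
--     res = False
--
--     blocks = break_in_blocks(ct, 16)
--
--     for block in blocks:
--         counts = blocks.count(block)
--         if counts > 1: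
--             res = True
--             break
--     return res
-- ===== SOURCE B (Python) =====
-- def is_aes_encrypted(ct):
--     blocks = sorted(ct[i:i + 16] for i in range(0, len(ct) - 16, 16))
--     for prev, cur in zip(blocks, blocks[1:]):
--         if prev == cur:
--             return True
--     return False
-- ===== Notes on version B (the rewrite author's own statement) =====
-- stated objective: faster
-- what changed: Replaces A's per-block blocks.count rescan of the whole block list with building the same block list once, sorting it, and one linear scan for an equal adjacent pair; asymptotic win shows on duplicate-free inputs (A early-exits when a duplicate appears early).
import Mathlib
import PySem

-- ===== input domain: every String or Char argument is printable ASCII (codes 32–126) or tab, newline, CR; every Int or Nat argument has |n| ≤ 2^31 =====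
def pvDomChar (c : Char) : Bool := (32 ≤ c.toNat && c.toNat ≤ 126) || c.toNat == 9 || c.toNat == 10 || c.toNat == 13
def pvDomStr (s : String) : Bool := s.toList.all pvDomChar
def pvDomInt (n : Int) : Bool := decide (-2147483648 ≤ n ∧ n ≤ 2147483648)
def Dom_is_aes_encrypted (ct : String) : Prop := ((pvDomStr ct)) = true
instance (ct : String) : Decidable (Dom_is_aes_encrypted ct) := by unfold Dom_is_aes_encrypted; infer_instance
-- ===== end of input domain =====

-- B replaces A's per-block `blocks.count` rescans by sorting the block list once and
-- scanning adjacent pairs; intended as faster on duplicate-free inputs (A early-exits when a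
-- duplicate block appears early).

-- ===== PORT A =====
-- while cur_index + ksize < len(plaintext): res.append(plaintext[cur_index:cur_index+ksize]); cur_index += ksize
-- (fuel = plaintext.length only makes the recursion total; with ksize = 16 it never runs out)
def breakLoop (pt : List Char) (ksize : Nat) : Nat → Nat → List (List Char) → List (List Char)
  | 0, _, acc => acc
  | fuel + 1, i, acc =>
    if i + ksize < pt.length then
      breakLoop pt ksize fuel (i + ksize)
        (acc ++ [PySem.List.slice pt (some (i : Int)) (some ((i : Int) + (ksize : Int)))])
    else acc

def break_in_blocks (pt : List Char) (ksize : Nat) : List (List Char) :=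
  breakLoop pt ksize pt.length 0 []

-- for block in blocks: if blocks.count(block) > 1: res = True; break
def aLoop (all : List (List Char)) : List (List Char) → Bool
  | [] => false
  | b :: rest => if 1 < PySem.List.count all b then true else aLoop all rest

def is_aes_encrypted (ct : String) : Bool :=
  let blocks := break_in_blocks ct.toList 16
  aLoop blocks blocks

-- ===== PORT B =====
-- for prev, cur in zip(blocks, blocks[1:]): if prev == cur: return True / return False
def adjDup : List (List Char) → Bool
  | a :: b :: t => if a = b then true else adjDup (b :: t)
  | _ => false

def is_aes_encrypted_alt (ct : String) : Bool :=
  let blocks := (PySem.List.pyRange 0 ((ct.toList.length : Int) - 16) 16).map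
    (fun j => PySem.List.slice ct.toList (some j) (some (j + 16)))
  adjDup (PySem.List.sorted blocks (fun x => x))

-- ===== PRECONDITION & SPEC =====
def Spec_is_aes_encrypted (ct : String) (out : Bool) : Prop := out = is_aes_encrypted_alt ct
instance (ct : String) (out : Bool) : Decidable (Spec_is_aes_encrypted ct out) := by unfold Spec_is_aes_encrypted; infer_instance

-- ===== CLAIM (what is proved, stated in full; the proofs are below) =====
def Claim_equal_is_aes_encrypted : Prop := ∀ (ct : String), Dom_is_aes_encrypted ct → Spec_is_aes_encrypted ct (is_aes_encrypted ct)

-- ===== LEMMAS AND PROOFS =====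

theorem pyRange_empty_of_le {a b s : Int} (hs : 0 < s) (h : b ≤ a) :
    PySem.List.pyRange a b s = [] := by
  rw [PySem.List.pyRange_of_pos a b hs]
  simp [show ¬ a < b by omega]

theorem pyRange_pos_cons {a b s : Int} (hs : 0 < s) (h : a < b) :
    PySem.List.pyRange a b s = a :: PySem.List.pyRange (a + s) b s := by
  rw [PySem.List.pyRange_of_pos a b hs, PySem.List.pyRange_of_pos (a + s) b hs]
  have hdiv : (b - a + s - 1) / s = (b - a - 1) / s + 1 := by
    rw [show b - a + s - 1 = b - a - 1 + 1 * s by ring,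
      Int.add_mul_ediv_right _ _ (by omega : s ≠ 0)]
  have hnn : 0 ≤ (b - a - 1) / s := Int.ediv_nonneg (by omega) (by omega)
  have hn : ((b - a + s - 1) / s).toNat = ((b - a - 1) / s).toNat + 1 := by
    rw [hdiv]; omega
  have hm : (if a + s < b then ((b - (a + s) + s - 1) / s).toNat else 0)
      = ((b - a - 1) / s).toNat := by
    by_cases hc : a + s < b
    · simp [hc, show b - (a + s) + s - 1 = b - a - 1 by ring]
    · have h0 : (b - a - 1) / s = 0 := Int.ediv_eq_zero_of_lt (by omega) (by omega)
      simp [hc, h0]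
  rw [if_pos h, hn, hm, List.range_succ_eq_map, List.map_cons, List.map_map]
  congr 1
  · simp
  · refine List.map_congr_left fun k _ => ?_
    simp only [Function.comp_apply, Nat.succ_eq_add_one]
    push_cast
    ring

theorem breakLoop_eq (fuel : Nat) (pt : List Char) (i : Nat) (acc : List (List Char))
    (h : pt.length ≤ 16 * fuel + i + 16) :
    breakLoop pt 16 fuel i acc
      = acc ++ (PySem.List.pyRange (i : Int) ((pt.length : Int) - 16) 16).map
          (fun j => PySem.List.slice pt (some j) (some (j + 16))) := by
  induction fuel generalizing i acc with
  | zero =>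
    have : ¬ (i + 16 < pt.length) := by omega
    rw [breakLoop, pyRange_empty_of_le (by omega) (by omega)]
    simp
  | succ n ih =>
    rw [breakLoop]
    by_cases hc : i + 16 < pt.length
    · rw [if_pos hc, ih (i + 16) _ (by omega),
        pyRange_pos_cons (by omega : (0:Int) < 16) (by omega : (i : Int) < (pt.length : Int) - 16)]
      simp [List.append_assoc]
    · rw [if_neg hc, pyRange_empty_of_le (by omega) (by omega)]
      simp

theorem aLoop_true_iff (all rest : List (List Char)) :
    aLoop all rest = true ↔ ∃ b ∈ rest, 1 < List.count b all := by
  induction rest with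
  | nil => simp [aLoop]
  | cons x t ih =>
    rw [aLoop]
    rw [PySem.List.count_eq]
    by_cases hc : 1 < List.count x all
    · simp only [if_pos hc]
      simp [hc]
    · simp only [if_neg hc, ih, List.mem_cons]
      constructor
      · rintro ⟨b, hb, hcnt⟩
        exact ⟨b, Or.inr hb, hcnt⟩
      · rintro ⟨b, rfl | hb, hcnt⟩
        · exact absurd hcnt hc
        · exact ⟨b, hb, hcnt⟩

theorem aLoop_self_iff (all : List (List Char)) :
    aLoop all all = true ↔ ¬ all.Nodup := by
  rw [aLoop_true_iff, List.nodup_iff_count_le_one]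
  constructor
  · rintro ⟨b, _, hb⟩ hno
    exact absurd (hno b) (by omega)
  · intro h
    rcases not_forall.mp h with ⟨b, hb⟩
    rw [Nat.not_le] at hb
    exact ⟨b, List.count_pos_iff.mp (by omega), by omega⟩

theorem sorted_inst_eq (xs : List (List Char)) :
    @PySem.List.sorted (List Char) (List Char) List.instLT (fun a b => a.decidableLT b)
        xs (fun x => x) false
      = @PySem.List.sorted (List Char) (List Char)
          (List.instLinearOrder.toLT) LinearOrder.toDecidableLT xs (fun x => x) false := by
  congr 1

theorem adjDup_true_iff (l : List (List Char)) (hp : l.Pairwise (· ≤ ·)) :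
    adjDup l = true ↔ ¬ l.Nodup := by
  induction l with
  | nil => simp [adjDup]
  | cons a t ih =>
    cases t with
    | nil => simp [adjDup]
    | cons b t' =>
      rw [adjDup]
      by_cases hab : a = b
      · subst hab
        simp [List.nodup_cons]
      · rw [if_neg hab, ih (List.Pairwise.of_cons hp)]
        have hnotmem : a ∉ b :: t' := by
          intro hmem
          rcases List.pairwise_cons.mp hp with ⟨hall, htail⟩
          have hab' : a < b := lt_of_le_of_ne (hall b (by simp)) hab
          rcases List.mem_cons.mp hmem with rfl | hmem'
          · exact hab rfl
          · rcases List.pairwise_cons.mp htail with ⟨hb, _⟩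
            exact absurd rfl (ne_of_lt (lt_of_lt_of_le hab' (hb a hmem')))
        simp [List.nodup_cons, hnotmem]

-- ===== VERDICT (by name: the statement is the Claim_ definition above) =====
theorem is_aes_encrypted_spec : Claim_equal_is_aes_encrypted := by
  intro ct _
  unfold Spec_is_aes_encrypted is_aes_encrypted is_aes_encrypted_alt break_in_blocks
  rw [breakLoop_eq ct.toList.length ct.toList 0 [] (by omega)]
  simp only [Nat.cast_zero, List.nil_append]
  set blocks := (PySem.List.pyRange 0 ((ct.toList.length : Int) - 16) 16).map
    (fun j => PySem.List.slice ct.toList (some j) (some (j + 16))) with hb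
  have hA : (aLoop blocks blocks = true) ↔ ¬ blocks.Nodup := aLoop_self_iff blocks
  have hB : (adjDup (@PySem.List.sorted (List Char) (List Char)
        (List.instLinearOrder.toLT) LinearOrder.toDecidableLT blocks (fun x => x) false) = true)
      ↔ ¬ blocks.Nodup := by
    rw [adjDup_true_iff _ (PySem.List.sorted_pairwise blocks (fun x => x)),
      (@PySem.List.sorted_perm (List Char) (List Char) (List.instLinearOrder.toLT)
        LinearOrder.toDecidableLT blocks (fun x => x) false).nodup_iff]
  rw [sorted_inst_eq]
  exact Bool.eq_iff_iff.mpr (by rw [hA, hB])
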